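-- pv_equiv track=rewrite | github.com/dummycode/PythonJunk | batmanRiddle.py | isUnique
-- ===== SOURCE A (Python) =====
-- import math
--
-- def isUnique(number):
--     digitList = []
--     while (number > 0):
--         digit = number % 10
--         number = math.floor(number / 10)
--         if (digit in digitList):
--             return False
--         digitList.append(digit)
--     return True
-- ===== SOURCE B (Python) =====
-- def isUnique(number):
--     if number <= 0:
--         return True
--     s = str(number)
--     return len(set(s)) == len(s)
-- ===== Notes on version B (the rewrite author's own statement) =====
-- stated objective: idiomatic
-- what changed: Replaces the modulo/floor digit-extraction loop with an incremental list membership scan by a single str() conversion and a set-size vs string-length comparison.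
import Mathlib
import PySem

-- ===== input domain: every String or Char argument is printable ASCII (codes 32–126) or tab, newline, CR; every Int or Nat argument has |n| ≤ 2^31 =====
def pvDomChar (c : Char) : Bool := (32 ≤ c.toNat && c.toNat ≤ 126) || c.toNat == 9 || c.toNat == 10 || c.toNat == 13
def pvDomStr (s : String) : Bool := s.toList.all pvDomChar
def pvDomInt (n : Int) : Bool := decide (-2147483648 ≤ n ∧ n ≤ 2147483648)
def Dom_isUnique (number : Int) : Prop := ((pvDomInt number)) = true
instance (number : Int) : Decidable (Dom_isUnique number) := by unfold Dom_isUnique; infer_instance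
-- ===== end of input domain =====

-- B replaces A's modulo/floor digit-extraction loop with a str() conversion and a
-- set-size vs string-length comparison (more idiomatic; same cost class in practice).


-- ===== PORT A =====
-- The while loop, as structural recursion on the shrinking `number`;
-- `math.floor(number / 10)` is ported as floor division, which is exact for |number| ≤ 2^31.
def isUniqueLoop (number : Int) (digitList : List Int) : Bool :=
  if _h : number > 0 then
    let digit := PySem.Int.mod number 10
    let number' := PySem.Int.floordiv number 10
    if digitList.contains digit then false
    else isUniqueLoop number' (digitList ++ [digit])
  else true
termination_by number.toNat
decreasing_by
  simp only [PySem.Int.floordiv, Int.fdiv_eq_ediv]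
  omega

def isUnique (number : Int) : Bool := isUniqueLoop number []

-- ===== PORT B =====
def isUnique_alt (number : Int) : Bool :=
  if number ≤ 0 then true
  else
    let s := PySem.Int.toStr number
    ((PySem.Set.ofList s.toList).length : Int) == PySem.Str.len s

-- ===== PRECONDITION & SPEC =====
def Spec_isUnique (number : Int) (out : Bool) : Prop := out = isUnique_alt number
instance (number : Int) (out : Bool) : Decidable (Spec_isUnique number out) := by unfold Spec_isUnique; infer_instance

-- ===== CLAIM (what is proved, stated in full; the proofs are below) =====
def Claim_equal_isUnique : Prop := ∀ (number : Int), Dom_isUnique number → Spec_isUnique number (isUnique number)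

-- ===== LEMMAS AND PROOFS =====

-- integer decimal digits of `n`, little-endian
def digitsI (n : Int) : List Int := (Nat.digits 10 n.toNat).map Int.ofNat

theorem digitsI_nodup_iff (n : Int) : (digitsI n).Nodup ↔ (Nat.digits 10 n.toNat).Nodup := by
  unfold digitsI
  exact List.nodup_map_iff (fun a b hab => Int.ofNat.inj hab)

theorem isUniqueLoop_char (fuel : Nat) : ∀ (n : Int) (L : List Int), n.toNat ≤ fuel →
    isUniqueLoop n L = decide ((digitsI n).Nodup ∧ ∀ d ∈ digitsI n, d ∉ L) := by
  induction fuel with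
  | zero =>
    intro n L hn
    have h0 : ¬ n > 0 := by omega
    rw [isUniqueLoop, dif_neg h0]
    have h1 : n.toNat = 0 := by omega
    simp [digitsI, h1]
  | succ f ih =>
    intro n L hn
    by_cases h : n > 0
    · rw [isUniqueLoop, dif_pos h]
      have hmod : PySem.Int.mod n 10 = ((n.toNat % 10 : Nat) : Int) := by
        simp only [PySem.Int.mod, Int.fmod_eq_emod]
        omega
      have hdiv : (PySem.Int.floordiv n 10).toNat = n.toNat / 10 := by
        simp only [PySem.Int.floordiv, Int.fdiv_eq_ediv]
        omega
      have hdig : digitsI n = ((n.toNat % 10 : Nat) : Int) :: digitsI (PySem.Int.floordiv n 10) := by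
        unfold digitsI
        rw [hdiv, Nat.digits_def' (by norm_num : (1:Nat) < 10) (by omega : 0 < n.toNat)]
        rfl
      rw [hmod, hdig]
      by_cases hc : L.contains ((n.toNat % 10 : Nat) : Int)
      · have hm : ((n.toNat % 10 : Nat) : Int) ∈ L := by simpa using hc
        rw [if_pos hc]
        symm
        rw [decide_eq_false_iff_not]
        rintro ⟨-, hall⟩
        exact hall _ (List.mem_cons_self ..) hm
      · have hm : ((n.toNat % 10 : Nat) : Int) ∉ L := by simpa using hc
        rw [if_neg hc, ih _ _ (by omega), decide_eq_decide]
        constructor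
        · rintro ⟨hnd, hdisj⟩
          have h0 : ((n.toNat % 10 : Nat) : Int) ∉ digitsI (PySem.Int.floordiv n 10) := by
            intro hmem
            exact hdisj _ hmem (List.mem_append_right _ (List.mem_singleton.mpr rfl))
          refine ⟨List.nodup_cons.mpr ⟨h0, hnd⟩, ?_⟩
          intro d hd
          rcases List.mem_cons.mp hd with hd | hd
          · exact hd ▸ hm
          · exact fun hx => hdisj d hd (List.mem_append_left _ hx)
        · rintro ⟨hnd0, hall⟩
          obtain ⟨h0, hnd⟩ := List.nodup_cons.mp hnd0
          refine ⟨hnd, fun d hd hx => ?_⟩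
          rcases List.mem_append.mp hx with hx | hx
          · exact hall d (List.mem_cons_of_mem _ hd) hx
          · exact h0 (List.mem_singleton.mp hx ▸ hd)
    · rw [isUniqueLoop, dif_neg h]
      have h1 : n.toNat = 0 := by omega
      simp [digitsI, h1]

theorem digitChar_inj : ∀ a < 10, ∀ b < 10, Nat.digitChar a = Nat.digitChar b → a = b := by
  decide

theorem toDigitsCore_eq (fuel : Nat) : ∀ (n : Nat) (ds : List Char), n < fuel → 0 < n →
    Nat.toDigitsCore 10 fuel n ds = ((Nat.digits 10 n).map Nat.digitChar).reverse ++ ds := by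
  induction fuel with
  | zero => intro n ds h _; omega
  | succ f ih =>
    intro n ds hf hn
    rw [Nat.toDigitsCore]
    have hdig : Nat.digits 10 n = n % 10 :: Nat.digits 10 (n / 10) :=
      Nat.digits_def' (by norm_num) hn
    by_cases h10 : n / 10 = 0
    · simp [h10, hdig]
    · rw [if_neg h10, ih _ _ (by omega) (by omega), hdig]
      simp

theorem toDigits_eq (n : Nat) (hn : 0 < n) :
    Nat.toDigits 10 n = ((Nat.digits 10 n).map Nat.digitChar).reverse := by
  have := toDigitsCore_eq (n + 1) n [] (by omega) hn
  simpa [Nat.toDigits] using this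

theorem ofList_length_eq_iff (cs : List Char) :
    (PySem.Set.ofList cs).length = cs.length ↔ cs.Nodup := by
  have hperm : (PySem.Set.ofList cs).Perm cs.dedup := by
    rw [List.perm_ext_iff_of_nodup (PySem.Set.nodup_ofList cs) (List.nodup_dedup cs)]
    intro a
    rw [PySem.Set.mem_ofList, List.mem_dedup]
  rw [hperm.length_eq]
  constructor
  · intro h
    have := (List.dedup_sublist cs).eq_of_length h
    rw [← this]
    exact List.nodup_dedup cs
  · intro h
    rw [h.dedup]

theorem chars_nodup_iff (n : Nat) (hn : 0 < n) :
    (Nat.toDigits 10 n).Nodup ↔ (Nat.digits 10 n).Nodup := by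
  rw [toDigits_eq n hn, List.nodup_reverse]
  constructor
  · exact List.Nodup.of_map _
  · intro h
    rw [List.nodup_map_iff_inj_on h]
    intro x hx y hy hxy
    exact digitChar_inj x (Nat.digits_lt_base (by norm_num) hx)
      y (Nat.digits_lt_base (by norm_num) hy) hxy

-- ===== VERDICT (by name: the statement is the Claim_ definition above) =====
theorem isUnique_spec : Claim_equal_isUnique := by
  intro n _
  unfold Spec_isUnique isUnique isUnique_alt
  rw [isUniqueLoop_char n.toNat n [] (le_refl _)]
  by_cases h : n ≤ 0
  · rw [if_pos h]
    have h1 : n.toNat = 0 := by omega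
    simp [digitsI, h1]
  · rw [if_neg h]
    have hpos : 0 < n.toNat := by omega
    have hneg : ¬ n < 0 := by omega
    have hch : (PySem.Int.toStr n).toList = Nat.toDigits 10 n.toNat := by
      rw [PySem.Int.toList_toStr]
      simp [PySem.Int.toChars, hneg]
    show decide ((digitsI n).Nodup ∧ ∀ d ∈ digitsI n, d ∉ ([] : List Int)) =
      (((PySem.Set.ofList (PySem.Int.toStr n).toList).length : Int) ==
        PySem.Str.len (PySem.Int.toStr n))
    rw [Bool.eq_iff_iff]
    simp only [decide_eq_true_eq, beq_iff_eq, PySem.Str.len, hch, Nat.cast_inj,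
      List.not_mem_nil, not_false_iff, imp_true_iff, and_true]
    rw [ofList_length_eq_iff, digitsI_nodup_iff, chars_nodup_iff _ hpos]
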